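-- pv_equiv track=rewrite | github.com/faisalalrico/FinalProject-DataStructure | module/administrator_mode.py | hitung_total_tahunan
-- ===== SOURCE A (Python) =====
-- def hitung_total_tahunan(transaksi):
--     hasil_tahunan = {}
--     for trans in transaksi:
--         tahun = trans['tahun']
--         if tahun not in hasil_tahunan:
--             hasil_tahunan[tahun] = 0
--         hasil_tahunan[tahun] += trans['total_harga']
--     return hasil_tahunan
-- ===== SOURCE B (Python) =====
-- def hitung_total_tahunan(transaksi):
--     # collect the distinct years in first-occurrence order, then sum each year's totals in one comprehension
--     tahun_urut = []
--     for trans in transaksi: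
--         if trans['tahun'] not in tahun_urut:
--             tahun_urut.append(trans['tahun'])
--     return {t: sum(trans['total_harga'] for trans in transaksi if trans['tahun'] == t)
--             for t in tahun_urut}
-- ===== Notes on version B (the rewrite author's own statement) =====
-- stated objective: alternative
-- what changed: Replaces the single-pass dict accumulation with a two-phase plan: first an ordered dedup of the years, then a dict comprehension that sums each year's totals with a per-year filtered scan.
import Mathlib
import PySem

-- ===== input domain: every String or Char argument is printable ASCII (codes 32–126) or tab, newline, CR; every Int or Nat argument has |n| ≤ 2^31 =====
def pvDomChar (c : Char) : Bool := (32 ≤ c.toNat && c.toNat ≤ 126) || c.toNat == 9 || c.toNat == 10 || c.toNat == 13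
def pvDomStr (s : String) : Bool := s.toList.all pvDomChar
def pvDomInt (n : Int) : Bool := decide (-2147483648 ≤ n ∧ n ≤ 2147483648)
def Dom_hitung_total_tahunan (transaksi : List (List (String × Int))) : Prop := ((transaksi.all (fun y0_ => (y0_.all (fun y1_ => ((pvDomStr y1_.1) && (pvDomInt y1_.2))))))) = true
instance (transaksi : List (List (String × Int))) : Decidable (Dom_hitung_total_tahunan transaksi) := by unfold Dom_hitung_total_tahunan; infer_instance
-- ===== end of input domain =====

-- B replaces A's single-pass dict accumulation by an ordered dedup of the years followed by a
-- per-year filtered summation; same values, genuinely different traversal (no speed claim).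


-- ===== PORT A =====
-- one iteration of A's loop; the `none` branches are Python KeyErrors, excluded by Pre_
def pvStepA (hasil : PySem.Dict Int Int) (trans : List (String × Int)) : PySem.Dict Int Int :=
  match (PySem.Dict.mk trans).get? "tahun" with
  | none => hasil
  | some tahun =>
    let hasil1 := if hasil.contains tahun then hasil else hasil.insert tahun 0
    match (PySem.Dict.mk trans).get? "total_harga" with
    | none => hasil1
    | some h => hasil1.insert tahun (hasil1.getD tahun 0 + h)

def hitung_total_tahunan (transaksi : List (List (String × Int))) : List (Int × Int) :=
  (transaksi.foldl pvStepA PySem.Dict.empty).items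

-- ===== PORT B =====
-- distinct years in first-occurrence order (the `tahun_urut` list of Source B)
def pvYears (transaksi : List (List (String × Int))) : PySem.Set Int :=
  transaksi.foldl (fun ys trans =>
    match (PySem.Dict.mk trans).get? "tahun" with
    | none => ys
    | some y => PySem.Set.add ys y) PySem.Set.empty

-- sum(trans['total_harga'] for trans in transaksi if trans['tahun'] == t)
def pvSumYear (transaksi : List (List (String × Int))) (t : Int) : Int :=
  ((transaksi.filter (fun trans => (PySem.Dict.mk trans).get? "tahun" == some t)).map
    (fun trans => ((PySem.Dict.mk trans).get? "total_harga").getD 0)).sum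

def hitung_total_tahunan_alt (transaksi : List (List (String × Int))) : List (Int × Int) :=
  (pvYears transaksi).map (fun t => (t, pvSumYear transaksi t))

-- ===== PRECONDITION & SPEC =====
-- Pre_ excludes exactly the transactions missing a 'tahun' or 'total_harga' key, on which A raises KeyError.
def Pre_hitung_total_tahunan (transaksi : List (List (String × Int))) : Prop :=
  ∀ trans ∈ transaksi, (PySem.Dict.mk trans).contains "tahun" = true ∧
    (PySem.Dict.mk trans).contains "total_harga" = true
instance (transaksi : List (List (String × Int))) : Decidable (Pre_hitung_total_tahunan transaksi) := by
  unfold Pre_hitung_total_tahunan; infer_instance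

def pvWitness_hitung_total_tahunan : (List (List (String × Int))) :=
  [[("tahun", 2020), ("total_harga", 5)], [("tahun", 2020), ("total_harga", 3)], [("tahun", 2019), ("total_harga", 7)]]

def Spec_hitung_total_tahunan (transaksi : List (List (String × Int))) (out : List (Int × Int)) : Prop := out = hitung_total_tahunan_alt transaksi
instance (transaksi : List (List (String × Int))) (out : List (Int × Int)) : Decidable (Spec_hitung_total_tahunan transaksi out) := by unfold Spec_hitung_total_tahunan; infer_instance

-- ===== CLAIM (what is proved, stated in full; the proofs are below) =====
def Claim_equal_hitung_total_tahunan : Prop := ∀ (transaksi : List (List (String × Int))), Dom_hitung_total_tahunan transaksi → Pre_hitung_total_tahunan transaksi → Spec_hitung_total_tahunan transaksi (hitung_total_tahunan transaksi)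

-- ===== LEMMAS AND PROOFS =====

theorem pre_append {l : List (List (String × Int))} {t : List (String × Int)}
    (h : Pre_hitung_total_tahunan (l ++ [t])) :
    Pre_hitung_total_tahunan l ∧ (PySem.Dict.mk t).contains "tahun" = true ∧
      (PySem.Dict.mk t).contains "total_harga" = true := by
  constructor
  · intro x hx; exact h x (by simp [hx])
  · exact h t (by simp)

theorem pvYears_append (l : List (List (String × Int))) (t : List (String × Int)) :
    pvYears (l ++ [t]) =
      (match (PySem.Dict.mk t).get? "tahun" with
       | none => pvYears l
       | some y => PySem.Set.add (pvYears l) y) := by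
  simp [pvYears, List.foldl_append]

theorem pvYears_nodup (l : List (List (String × Int))) : (pvYears l).Nodup := by
  induction l using List.reverseRecOn with
  | nil => simp [pvYears]
  | append_singleton l t ih =>
    rw [pvYears_append]
    cases (PySem.Dict.mk t).get? "tahun" with
    | none => exact ih
    | some y => exact PySem.Set.nodup_add _ y ih

theorem pvSumYear_append (l : List (List (String × Int))) (t : List (String × Int)) (v : Int) :
    pvSumYear (l ++ [t]) v = pvSumYear l v +
      (if (PySem.Dict.mk t).get? "tahun" == some v
       then ((PySem.Dict.mk t).get? "total_harga").getD 0 else 0) := by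
  simp only [pvSumYear, List.filter_append]
  split_ifs with hcond
  · simp [hcond]
  · simp [hcond]

-- invariant: the keys of A's accumulator are exactly B's ordered dedup of the years
theorem keys_foldA (l : List (List (String × Int))) (hp : Pre_hitung_total_tahunan l) :
    (l.foldl pvStepA PySem.Dict.empty).keys = pvYears l := by
  induction l using List.reverseRecOn with
  | nil => simp [pvYears, PySem.Dict.keys_empty]
  | append_singleton l t ih =>
    obtain ⟨hpl, hty, hth⟩ := pre_append hp
    rw [List.foldl_append, List.foldl_cons, List.foldl_nil, pvYears_append]
    rw [PySem.Dict.contains_eq_isSome_get?] at hty hth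
    set D := l.foldl pvStepA PySem.Dict.empty with hD
    cases hy : (PySem.Dict.mk t).get? "tahun" with
    | none => simp [hy] at hty
    | some y =>
      cases hh : (PySem.Dict.mk t).get? "total_harga" with
      | none => simp [hh] at hth
      | some h =>
        simp only [pvStepA, hy, hh]
        by_cases hc : D.contains y = true
        · have hmem : y ∈ pvYears l := by
            rw [← ih hpl]; exact (PySem.Dict.contains_iff_mem_keys D y).mp hc
          rw [if_pos hc, PySem.Dict.keys_insert_of_contains D _ hc, ih hpl,
            PySem.Set.add_of_mem hmem]
        · have hc' : D.contains y = false := by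
            cases hcv : D.contains y with
            | true => exact absurd hcv hc
            | false => rfl
          have hnmem : y ∉ pvYears l := by
            rw [← ih hpl]; intro hm
            exact hc ((PySem.Dict.contains_iff_mem_keys D y).mpr hm)
          rw [if_neg (by simp [hc']),
            PySem.Dict.keys_insert_of_contains _ _ (PySem.Dict.contains_insert_self D y 0),
            PySem.Dict.keys_insert_of_not_contains D _ hc', ih hpl,
            PySem.Set.add_of_not_mem hnmem]

-- invariant: each entry of A's accumulator holds B's per-year sum
theorem getD_foldA (l : List (List (String × Int))) (hp : Pre_hitung_total_tahunan l) (v : Int) :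
    (l.foldl pvStepA PySem.Dict.empty).getD v 0 = pvSumYear l v := by
  induction l using List.reverseRecOn with
  | nil => simp [pvSumYear, PySem.Dict.getD_empty]
  | append_singleton l t ih =>
    obtain ⟨hpl, hty, hth⟩ := pre_append hp
    rw [List.foldl_append, List.foldl_cons, List.foldl_nil, pvSumYear_append]
    rw [PySem.Dict.contains_eq_isSome_get?] at hty hth
    set D := l.foldl pvStepA PySem.Dict.empty with hD
    cases hy : (PySem.Dict.mk t).get? "tahun" with
    | none => simp [hy] at hty
    | some y =>
      cases hh : (PySem.Dict.mk t).get? "total_harga" with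
      | none => simp [hh] at hth
      | some h =>
        simp only [pvStepA, hy, hh]
        set D1 := if D.contains y = true then D else D.insert y 0 with hD1def
        have hD1y : D1.getD y 0 = D.getD y 0 := by
          by_cases hc : D.contains y = true
          · rw [hD1def, if_pos hc]
          · have hc' : D.contains y = false := by
              cases hcv : D.contains y with
              | true => exact absurd hcv hc
              | false => rfl
            rw [hD1def, if_neg hc, PySem.Dict.getD_insert_self,
              PySem.Dict.getD_of_not_contains D _ hc']
        by_cases hv : v = y
        · subst hv
          rw [PySem.Dict.getD_insert_self, hD1y, ih hpl]
          simp
        · have hD1v : D1.getD v 0 = D.getD v 0 := by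
            by_cases hc : D.contains y = true
            · rw [hD1def, if_pos hc]
            · rw [hD1def, if_neg hc, PySem.Dict.getD_insert_of_ne D _ _ hv]
          rw [PySem.Dict.getD_insert_of_ne D1 _ _ hv, hD1v, ih hpl]
          simp [Ne.symm hv]

-- ===== VERDICT (by name: the statement is the Claim_ definition above) =====
theorem hitung_total_tahunan_spec : Claim_equal_hitung_total_tahunan := by
  intro transaksi _ hp
  unfold Spec_hitung_total_tahunan hitung_total_tahunan hitung_total_tahunan_alt
  have hnd : (transaksi.foldl pvStepA PySem.Dict.empty).keys.Nodup := by
    rw [keys_foldA transaksi hp]; exact pvYears_nodup transaksi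
  rw [PySem.Dict.items_eq_map_keys _ hnd 0, keys_foldA transaksi hp]
  exact List.map_congr_left (fun y _ => by rw [getD_foldA transaksi hp y])
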